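/- GENERATED by tools/from_farm_form.py from prooffarm-gif/accepted/DGifOpen.E/Proof.lean (a worked proof of the farm's unit `DGifOpen.E`,
   accepted by the verdict) — do not edit. -/
import Gif.Spec.Units.DGifOpen_E
import Gif.Spec.AllSegs

open X86 X86.User Asan ProgX.Base ProgX.Base.Spec Gif.Spec

set_option maxRecDepth 4000
set_option maxHeartbeats 4000000

/-!
  `DGifOpen.E` (0x108816 … the `ret` at 0x108833, 10 instructions; dgif_lib.c:242): THE EPILOGUE OF THE PROTECTED FUNCTION `DGifOpen`.
  The recipe is that of farm.gif/worked/DGifGetWord.E (Gif/Spec/FrameCarry.lean §1, §2, §4), with two differences: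
    * the heap at the exit (`Hc`) is not the entry's (`H`): `epilogue_same` of FrameCarry.lean asks ONE heap for both invariants,
      so its proof is repeated here for two heaps (`dgo_epilogue_same`);
    * on the NULL arm there is no forest: `HeapInv.epilogue_ra`, `CursorOK.sameExcept`, `Consts.sameExcept`, `rem_sameExcept` are
      used directly (not `after_epilogue`, which asks `GifOK`); on the other arm `GifOK.storesMem`.
-/

namespace Gif.Spec.DGifOpen_E

/-- **THE FRAME'S SHADOW SPAN LEAVES THE FOOTPRINT, for TWO heaps**: `epilogue_same` (Gif/Spec/FrameCarry.lean §4) with the entry's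
invariant stated for the heap `H0` and the invariant before the epilogue's stores for the heap `H1` (DGifOpen allocates: the two
differ). Only the shadow layer of the two invariants is used. -/
theorem dgo_epilogue_same {H0 H1 : Heap} {rest : List Obj} {frames : List (Nat × FrameLayout)} {top top' ro ro' : Nat}
    {m0 m1 : Mem} {Fl : FrameLayout} {w : Span} {ws : List Span} (hro : Fl.raOff = ro) (hro' : Fl.raOff - Fl.size = ro')
    (hinv0 : HeapInv H0 rest frames (top + 8) m0) (hinv1 : HeapInv H1 rest ((top - ro, Fl) :: frames) top' m1)
    (hra : top % 8 = 0)
    (hsame : Mem.SameExcept (w :: shadowSpan (top - ro) (top - ro') :: ws) m0 m1) :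
    Mem.SameExcept (w :: ws) m0 (storesMem m1 ((top - ro) / 8) Fl.epilogue) := by
  subst hro
  subst hro'
  have hact := hinv1.shadow.stack.active (top - Fl.raOff, Fl) List.mem_cons_self
  simp only at hact
  obtain ⟨hF, hb8, hb1, hb2, hp⟩ := hact
  have hlo := hinv1.shadow.stack.lo
  have hc1 := FrameLayout.epilogue_clean hF hb8 hb2 hp
  have hc0 := hinv0.shadow.stack.clean
  obtain ⟨hs8, _, hein, _, _, _, _, _, hr8, hrs⟩ := hF
  have hg : (top - Fl.raOff) / 8 + Fl.size / 8 ≤ 0x200000 := by omega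
  have h2 := storesMem_sameExcept m1 ((top - Fl.raOff) / 8) (Fl.size / 8) Fl.epilogue hein hg
  intro a ha
  by_cases hin : 0xC00000 + (top - Fl.raOff) / 8 ≤ a.toNat ∧ a.toNat < 0xC00000 + (top - Fl.raOff) / 8 + Fl.size / 8
  · -- a shadow byte of the frame: 0 in both memories
    have ea : a = shadowAddr (a.toNat - 0xC00000) := eq_shadowAddr a _ (by omega)
    have z1 := hc1 (a.toNat - 0xC00000) (by omega) (by omega)
    have z0 := hc0 (a.toNat - 0xC00000) (by omega) (by omega)
    unfold shadowOf at z1 z0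
    rw [← ea] at z1 z0
    apply UInt8.toNat_inj.mp
    rw [z1, z0]
  · -- any other byte: neither the epilogue's stores nor the function wrote it
    have e2 : (storesMem m1 ((top - Fl.raOff) / 8) Fl.epilogue).read a = m1.read a := by
      apply h2 a
      intro x hx
      have e := List.mem_singleton.mp hx
      rw [e]
      simp only
      omega
    rw [e2]
    apply hsame a
    intro x hx
    rcases List.mem_cons.mp hx with e | hx'
    · rw [e]
      exact ha w List.mem_cons_self
    · rcases List.mem_cons.mp hx' with e | hx''
      · rw [e]
        unfold shadowSpan
        simp only
        omega
      · exact ha x (List.mem_cons_of_mem _ hx'')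

end Gif.Spec.DGifOpen_E

/-- The epilogue of `DGifOpen` takes `Done` at 0x108816 to `Returned`. -/
theorem Gif.Spec.Proved.DGifOpen_E_ok : Gif.Spec.DGifOpen_E.Statement := by
  intro Lay hLay μ hμ u₀ hcode H rest frames R Hc e ret v hat
  -- 1. THE PRELUDE: the entry assertion `Done` = `Core` + the post stated of the present memory
  obtain ⟨hcore, hregion, hinv, hcursor, hconsts, hres⟩ := hat
  have he := hcore.entry
  v_entry he
  obtain ⟨hheap, hctx, hcur0, hconsts0, hrdi, hrsi, herr⟩ := hcore.pre
  have w_rip := hcore.rip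
  have c_rsp : v.reg .rsp = e.reg .rsp - 120 := hcore.rsp
  have w_kept : RegsKept [.rsp] v v := RegsKept.refl _ _
  have w_eq : Mem.EqOn ProgX.Base.L.textLo ProgX.Base.L.textHi u₀.mem v.mem := ProgX.Base.conv_code_eqOn hcore.code
  have hdf := (show abiInv _ from hcore.abi).1
  have hmx := (show abiInv _ from hcore.abi).2
  have hsse := ProgX.Base.sseOK_of_abiInv hcore.abi
  -- the slots the six pops and the `ret` read
  have k_r15 : v.mem.readLE (e.reg .rsp - 8) 8 = (e.reg .r15).toNat := hcore.slot_r15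
  have k_r14 : v.mem.readLE (e.reg .rsp - 16) 8 = (e.reg .r14).toNat := hcore.slot_r14
  have k_r13 : v.mem.readLE (e.reg .rsp - 24) 8 = (e.reg .r13).toNat := hcore.slot_r13
  have k_r12 : v.mem.readLE (e.reg .rsp - 32) 8 = (e.reg .r12).toNat := hcore.slot_r12
  have k_rbp : v.mem.readLE (e.reg .rsp - 40) 8 = (e.reg .rbp).toNat := hcore.slot_rbp
  have k_rbx : v.mem.readLE (e.reg .rsp - 48) 8 = (e.reg .rbx).toNat := hcore.slot_rbx
  have k_ra : UInt64.ofNat (v.mem.readLE (e.reg .rsp) 8) = ret := hcore.slot_ra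
  -- THE SHADOW INDEX REGISTER `r12` AS A VARIABLE `b` WITH BOUNDS: no `>>> 3` is in the walk's context
  have e120 : (e.reg .rsp - 120).toNat = (e.reg .rsp).toNat - 120 := by u_omega
  obtain ⟨b, hb⟩ : ∃ b : Word, b = (e.reg .rsp - 120) >>> 3 := ⟨_, rfl⟩
  have hbn : b.toNat = ((e.reg .rsp).toNat - 120) / 8 := by
    rw [hb, Asan.toNat_shr3, e120]
  have hb1 : 0xE0000 ≤ b.toNat := by omega
  have hb2 : b.toNat + 8 ≤ 0x100000 := by omega
  have c_r12 : v.reg .r12 = b := by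
    rw [hb]
    exact hcore.r12
  clear hb
  -- the result register, named
  obtain ⟨z, c_rbx⟩ : ∃ z, v.reg .rbx = z := ⟨_, rfl⟩
  -- 2. THE WALK, 108816H … the `ret` at 108833H (dgif_lib.c:242)
  u_walk hcode [hμ.vendor] span [ProgX.Base.L.textLo, ProgX.Base.L.textHi] side (v_side)
  -- 3. THE EPILOGUE'S STORE AS THE LAYOUT'S `storesMem`
  have hepi : Gif.Frames.DGifOpen.epilogue = [⟨0, 8, 0⟩] := rfl
  have hmem : s_108833.mem = storesMem v.mem (((e.reg .rsp).toNat - 120) / 8) Gif.Frames.DGifOpen.epilogue := by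
    rw [hepi, w_mem, ← hbn]
    exact stores1_index v.mem b 12582912 0 8 0 (by omega) (by decide) (by decide)
  have hin : ∀ s, s ∈ Gif.Frames.DGifOpen.epilogue → s.idx + s.width ≤ 8 := by decide
  clear w_mem
  -- 4. THE ENVIRONMENT behind the epilogue: the callers' frames, the clean stack ends above the return address
  have hinv2 : HeapInv Hc rest frames ((e.reg .rsp).toNat + 8)
      (storesMem v.mem (((e.reg .rsp).toNat - 120) / 8) Gif.Frames.DGifOpen.epilogue) :=
    Asan.HeapInv.epilogue_ra (F := Gif.Frames.DGifOpen) hinv he_align he_top hheap.inv.frames_above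
  -- the cursor lies in the stack region, above the frame
  have hcur := (hctx.push ((e.reg .rsp).toNat - 120) Gif.Frames.DGifOpen).cursor_range hinv.shadow
  -- the epilogue's footprint: the frame's 8 shadow bytes
  have hg : ((e.reg .rsp).toNat - 120) / 8 + 8 ≤ 0x200000 := by omega
  have hse := storesMem_sameExcept v.mem (((e.reg .rsp).toNat - 120) / 8) 8 Gif.Frames.DGifOpen.epilogue hin hg
  have hcursor2 : CursorOK R (storesMem v.mem (((e.reg .rsp).toNat - 120) / 8) Gif.Frames.DGifOpen.epilogue) := by
    refine hcursor.sameExcept hse (by omega) ?_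
    intro w hw
    have ew := List.mem_singleton.mp hw
    rw [ew]
    simp only
    omega
  have hconsts2 : Consts (storesMem v.mem (((e.reg .rsp).toNat - 120) / 8) Gif.Frames.DGifOpen.epilogue) := by
    refine hconsts.sameExcept hse ?_
    intro w hw
    have ew := List.mem_singleton.mp hw
    rw [ew]
    simp only
    omega
  have hrem2 : rem R (storesMem v.mem (((e.reg .rsp).toNat - 120) / 8) Gif.Frames.DGifOpen.epilogue) = rem R v.mem := by
    refine rem_sameExcept hse (by omega) ?_
    intro w hw
    have ew := List.mem_singleton.mp hw
    rw [ew]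
    simp only
    omega
  -- the frame's shadow span leaves the footprint
  have hsame2 := Gif.Spec.DGifOpen_E.dgo_epilogue_same (top := (e.reg .rsp).toNat) (ro := 120) (ro' := 56)
    (Fl := Gif.Frames.DGifOpen) rfl rfl hheap.inv hinv he_align hcore.same
  rw [← hmem] at hinv2 hcursor2 hconsts2 hrem2 hsame2
  -- 5. `Returned`, field by field
  refine ReachVia.done ?_
  refine X86.User.Returned.mk w_rip w_rsp ?saved ?same (ProgX.Base.conv_code_in w_eq) ?abi ?post
  case saved =>
    -- all six callee-saved registers were pushed and are popped: the walker's facts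
    intro r hr
    cases r <;> first
      | exact absurd hr (by decide)
      | (with_reducible assumption)
  case same =>
    simp only [X86.User.Spec.footprint, vspec]
    exact hsame2
  case abi =>
    -- DF and MXCSR by hand (`v_inv` is slow behind a walk with shadow stores)
    refine ProgX.Base.abiInv_of ?_ ?_
    · rw [w_flags]
      simp only [X86.User.df_setStatus]
      exact hdf
    · rw [w_mxcsr]
      exact hmx
  case post =>
    -- the contract's post for the heap `Hc`
    refine ⟨Hc, hregion, hinv2, hcursor2, hconsts2, ?_, ?_⟩
    · rw [hrem2]
      exact hcore.rem
    · rw [w_rax, ← c_rbx]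
      rcases hres with h0 | ⟨F', hgif, hok, hicm, hsaved, hpend⟩
      · left
        exact h0
      · right
        refine ⟨F', hgif, ?_, hicm, hsaved, hpend⟩
        rw [hmem]
        exact hok.storesMem hinv.heap hcur.2.1 _ 8 _ hin hg
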